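-- pv_equiv track=rewrite | github.com/krudny/Algorithms-and-Data-Structures | Exam Tasks/Dynamic Programming Tasks/1D/20. BEST TEAM WITH NO CONFLICTS/a.py | team
-- ===== SOURCE A (Python) =====
-- def team(scores, ages):
--     n = len(scores)
--     A = []
--
--     for i in range(n):
--         A.append((scores[i], ages[i]))
--
--     A.sort()
--
--     DP = [A[i][0] for i in range(n)]
--
--     for i in range(1, n):
--         for j in range(i):
--             if A[i][1] >= A[j][1]:
--                 DP[i] = max(DP[i], A[i][0] + DP[j])
--
--     return max(DP)
-- ===== SOURCE B (Python) =====
-- def team(scores, ages):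
--     # Pareto front of (age, best-sum): dominated entries are pruned, so the
--     # inner scans run over the (typically small) front, not all previous players.
--     front = []   # (age, best team sum ending at an entry with this age)
--     best = None
--     for s, a in sorted(zip(scores, ages)):
--         q = 0
--         for a2, v in front:
--             if a2 <= a and v > q:
--                 q = v
--         dp = s + q
--         if best is None or dp > best:
--             best = dp
--         front = [(a2, v) for a2, v in front if a2 < a or v > dp] + [(a, dp)]
--     return best
-- ===== Notes on version B (the rewrite author's own statement) =====
-- stated objective: faster
-- what changed: Instead of a DP array with a quadratic scan over all previous players, B sweeps the sorted (score, age) pairs once while maintaining a pruned Pareto front of (age, best-sum) pairs (dominated entries removed) and a running maximum; intended as faster by a constant mechanism (the inner scans run over the pruned front, not all previous players) and measured ~2.2-2.6x in a timing run at the sizes both finish, but the worst case (age- and sum-increasing data) remains quadratic.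
import Mathlib
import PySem

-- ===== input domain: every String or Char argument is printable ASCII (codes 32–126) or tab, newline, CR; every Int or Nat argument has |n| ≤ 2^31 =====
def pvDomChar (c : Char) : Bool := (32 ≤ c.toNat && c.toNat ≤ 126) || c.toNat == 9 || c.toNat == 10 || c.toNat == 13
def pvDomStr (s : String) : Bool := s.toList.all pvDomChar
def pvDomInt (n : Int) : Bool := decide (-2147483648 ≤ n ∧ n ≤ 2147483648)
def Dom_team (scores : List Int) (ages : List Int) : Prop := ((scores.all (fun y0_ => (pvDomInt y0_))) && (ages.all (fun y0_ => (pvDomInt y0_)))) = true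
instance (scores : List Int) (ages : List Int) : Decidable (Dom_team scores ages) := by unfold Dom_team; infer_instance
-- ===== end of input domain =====

-- B replaces A's quadratic DP-array scan by a sweep over the sorted pairs that keeps a
-- pruned Pareto front of (age, best-sum) pairs and a running maximum; intended as faster
-- (measured ~2.5x in a timing run at the sizes both finish; worst case stays quadratic).

-- ===== PORT A =====
-- literal port of Source A: build A = [(scores[i], ages[i])], sort, DP array, nested index loops, max(DP)
def team (scores : List Int) (ages : List Int) : Int :=
  let n : Int := scores.length
  let A : List (Int × Int) :=
    (PySem.List.pyRange 0 n 1).foldl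
      (fun acc i => acc ++ [(PySem.List.pyGetD scores i 0, PySem.List.pyGetD ages i 0)]) []
  let A := PySem.List.sorted2 A (fun p => p.1) (fun p => p.2)
  let DP : List Int := (PySem.List.pyRange 0 n 1).map (fun i => (PySem.List.pyGetD A i (0, 0)).1)
  let DP := (PySem.List.pyRange 1 n 1).foldl (fun DP i =>
      (PySem.List.pyRange 0 i 1).foldl (fun DP j =>
        if (PySem.List.pyGetD A i (0, 0)).2 ≥ (PySem.List.pyGetD A j (0, 0)).2 then
          PySem.List.pySetD DP i
            (max (PySem.List.pyGetD DP i 0) ((PySem.List.pyGetD A i (0, 0)).1 + PySem.List.pyGetD DP j 0))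
        else DP) DP) DP
  -- max(DP); ValueError (DP = []) is excluded by Pre_team
  (PySem.List.max? DP (fun x => x)).getD 0

-- ===== PORT B =====
-- literal port of Source B; the Python returns None on empty zip (excluded by Pre_team): .getD 0 here
def team_alt (scores : List Int) (ages : List Int) : Int :=
  let r := (PySem.List.sorted2 (scores.zip ages) (fun p => p.1) (fun p => p.2)).foldl
    (fun st p =>
      let q := st.1.foldl (fun q p2 => if p2.1 ≤ p.2 ∧ p2.2 > q then p2.2 else q) 0
      let dp := p.1 + q
      let best : Option Int := match st.2 with
        | none => some dp
        | some b => some (if dp > b then dp else b)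
      (st.1.filter (fun p2 => p2.1 < p.2 ∨ p2.2 > dp) ++ [(p.2, dp)], best))
    ([], (none : Option Int))
  (r.2).getD 0

-- ===== PRECONDITION & SPEC =====
-- Pre_ excludes empty scores (A's max([]) raises ValueError) and ages shorter than scores
-- (A's ages[i] raises IndexError); extra trailing ages are fine for A and are admitted.
def Pre_team (scores : List Int) (ages : List Int) : Prop :=
  scores ≠ [] ∧ scores.length ≤ ages.length
instance (scores : List Int) (ages : List Int) : Decidable (Pre_team scores ages) := by
  unfold Pre_team; infer_instance
def pvWitness_team : List Int × List Int := ([4, 5, 6, 5], [2, 1, 2, 1])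

def Spec_team (scores : List Int) (ages : List Int) (out : Int) : Prop := out = team_alt scores ages
instance (scores : List Int) (ages : List Int) (out : Int) : Decidable (Spec_team scores ages out) := by
  unfold Spec_team; infer_instance

-- ===== CLAIM (what is proved, stated in full; the proofs are below) =====
def Claim_equal_team : Prop := ∀ (scores : List Int) (ages : List Int),
  Dom_team scores ages → Pre_team scores ages → Spec_team scores ages (team scores ages)
-- ===== LEMMAS AND PROOFS =====

-- prefix-max query with accumulator m: fold max over the values of entries (a2, v) with a2 ≤ x
def mfA (x : Int) (m : Int) (l : List (Int × Int)) : Int :=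
  l.foldl (fun m p => if p.1 ≤ x then max m p.2 else m) m

-- reference step: proc is the list of (age, dp) of already-processed sorted pairs (s, a)
def step2 (P : List (Int × Int)) (p : Int × Int) : List (Int × Int) :=
  P ++ [(p.2, p.1 + mfA p.2 0 P)]

-- the dp values produced from processed-state proc over the remaining pairs
def dvals : List (Int × Int) → List (Int × Int) → List Int
  | _,    []          => []
  | proc, (p :: rest) => (p.1 + mfA p.2 0 proc) :: dvals (proc ++ [(p.2, p.1 + mfA p.2 0 proc)]) rest

-- the running-best update of Source B
def updOpt (b : Option Int) (d : Int) : Option Int :=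
  match b with
  | none => some d
  | some v => some (if d > v then d else v)

lemma mfA_nil (x m : Int) : mfA x m [] = m := rfl

lemma mfA_cons (x m : Int) (p : Int × Int) (l : List (Int × Int)) :
    mfA x m (p :: l) = mfA x (if p.1 ≤ x then max m p.2 else m) l := rfl

lemma mfA_append (x m : Int) (l1 l2 : List (Int × Int)) :
    mfA x m (l1 ++ l2) = mfA x (mfA x m l1) l2 := by
  simp [mfA, List.foldl_append]

-- pruning below the query age is invisible: entries dropped at an insertion of age a > x
-- all have first component ≥ a, hence > x
lemma mfA_filter_high (x a d : Int) (hx : x < a) :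
    ∀ (l : List (Int × Int)) (m : Int),
      mfA x m (l.filter (fun p => decide (p.1 < a ∨ p.2 > d))) = mfA x m l := by
  intro l
  induction l with
  | nil => intro m; rfl
  | cons p l ih =>
    intro m
    rw [List.filter_cons]
    by_cases hk : p.1 < a ∨ p.2 > d
    · rw [if_pos (by simpa using hk), mfA_cons, mfA_cons, ih]
    · rw [if_neg (by simpa using hk), mfA_cons, ih]
      have hpx : ¬ p.1 ≤ x := by push Not at hk; omega
      rw [if_neg hpx]

-- pruning at an insertion of age a ≤ x never changes the query joined with the new value d
lemma mfA_filter_prune (x a d : Int) (_hax : a ≤ x) :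
    ∀ (l : List (Int × Int)) (m m' : Int), max m d = max m' d →
      max (mfA x m (l.filter (fun p => decide (p.1 < a ∨ p.2 > d)))) d = max (mfA x m' l) d := by
  intro l
  induction l with
  | nil => intro m m' h; simpa [mfA_nil] using h
  | cons p l ih =>
    intro m m' h
    rw [List.filter_cons]
    by_cases hk : p.1 < a ∨ p.2 > d
    · rw [if_pos (by simpa using hk), mfA_cons, mfA_cons]
      apply ih
      by_cases hpx : p.1 ≤ x
      · rw [if_pos hpx, if_pos hpx, max_right_comm m p.2 d, max_right_comm m' p.2 d, h]
      · rw [if_neg hpx, if_neg hpx]; exact h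
    · rw [if_neg (by simpa using hk), mfA_cons]
      push Not at hk
      apply ih
      by_cases hpx : p.1 ≤ x
      · rw [if_pos hpx, max_right_comm m' p.2 d,
            max_eq_left (le_trans hk.2 (le_max_right m' d)), ← h]
      · rw [if_neg hpx]; exact h

-- Source B's inner query loop is mfA
lemma qfold_eq_mfA (x : Int) :
    ∀ (l : List (Int × Int)) (m : Int),
      l.foldl (fun q p2 => if p2.1 ≤ x ∧ p2.2 > q then p2.2 else q) m = mfA x m l := by
  intro l
  induction l with
  | nil => intro m; rfl
  | cons p l ih =>
    intro m
    rw [List.foldl_cons, mfA_cons, ih]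
    congr 1
    split_ifs <;> omega

-- shifting the score out of A's inner running max
lemma foldl_shift (x s : Int) :
    ∀ (P : List (Int × Int)) (m : Int),
      P.foldl (fun c p => if p.1 ≤ x then max c (s + p.2) else c) (s + m) = s + mfA x m P := by
  intro P
  induction P with
  | nil => intro m; rfl
  | cons p P ih =>
    intro m
    rw [List.foldl_cons, mfA_cons]
    by_cases hpx : p.1 ≤ x
    · simp only [hpx, if_pos]
      rw [Int.max_add_left s m p.2]
      exact ih (max m p.2)
    · simp only [hpx, ite_false]
      exact ih m

lemma foldl_step2_map_snd :
    ∀ (rest proc : List (Int × Int)),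
      (rest.foldl step2 proc).map (fun p => p.2) = proc.map (fun p => p.2) ++ dvals proc rest := by
  intro rest
  induction rest with
  | nil => intro proc; simp [dvals]
  | cons p rest ih =>
    intro proc
    rw [List.foldl_cons, ih, dvals]
    simp [step2]

lemma foldl_step2_map_fst :
    ∀ (rest proc : List (Int × Int)),
      (rest.foldl step2 proc).map (fun p => p.1) = proc.map (fun p => p.1) ++ rest.map (fun p => p.2) := by
  intro rest
  induction rest with
  | nil => intro proc; simp
  | cons p rest ih =>
    intro proc
    rw [List.foldl_cons, ih]
    simp [step2]

lemma foldl_step2_length (rest proc : List (Int × Int)) :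
    (rest.foldl step2 proc).length = proc.length + rest.length := by
  have := congrArg List.length (foldl_step2_map_fst rest proc)
  simpa using this

-- Source B's sweep, against the reference dp values, under the front invariant
lemma Bmain :
    ∀ (rest front proc : List (Int × Int)) (best : Option Int),
      (∀ x m, mfA x m front = mfA x m proc) →
      (rest.foldl
        (fun st p =>
          let q := st.1.foldl (fun q p2 => if p2.1 ≤ p.2 ∧ p2.2 > q then p2.2 else q) 0
          let dp := p.1 + q
          let best : Option Int := match st.2 with
            | none => some dp
            | some b => some (if dp > b then dp else b)
          (st.1.filter (fun p2 => p2.1 < p.2 ∨ p2.2 > dp) ++ [(p.2, dp)], best))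
        (front, best)).2
      = (dvals proc rest).foldl updOpt best := by
  intro rest
  induction rest with
  | nil => intro front proc best _; simp [dvals]
  | cons p rest ih =>
    intro front proc best hf
    rw [List.foldl_cons, dvals, List.foldl_cons]
    have hq : (front.foldl (fun q p2 => if p2.1 ≤ p.2 ∧ p2.2 > q then p2.2 else q) 0)
        = mfA p.2 0 proc := by rw [qfold_eq_mfA, hf]
    simp only [hq]
    have hbest : (match best with
        | none => some (p.1 + mfA p.2 0 proc)
        | some b => some (if p.1 + mfA p.2 0 proc > b then p.1 + mfA p.2 0 proc else b))
        = updOpt best (p.1 + mfA p.2 0 proc) := rfl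
    rw [hbest]
    apply ih
    intro x m
    rw [mfA_append, mfA_append]
    by_cases hax : p.2 ≤ x
    · rw [mfA_cons, mfA_nil, mfA_cons, mfA_nil]
      simp only [hax, if_pos]
      rw [← hf x m]
      exact mfA_filter_prune x p.2 (p.1 + mfA p.2 0 proc) hax front m m rfl
    · rw [mfA_cons, mfA_nil, mfA_cons, mfA_nil]
      simp only [hax, ite_false]
      rw [mfA_filter_high x p.2 (p.1 + mfA p.2 0 proc) (by omega) front m, hf]

lemma foldl_updOpt_some :
    ∀ (t : List Int) (b : Int), t.foldl updOpt (some b) = some (t.foldl max b) := by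
  intro t
  induction t with
  | nil => intro b; rfl
  | cons a t ih =>
    intro b
    rw [List.foldl_cons, List.foldl_cons]
    have : updOpt (some b) a = some (max b a) := by
      simp [updOpt, max_def]; split_ifs <;> omega
    rw [this, ih]


-- A's inner loop over j < i updates only slot i; it folds the prefix information P
lemma innerAux (Aarr P : List (Int × Int)) (DP : List Int) (i : Nat)
    (hi : i < DP.length) (hP : P.length = i)
    (hage : ∀ j : Nat, j < i → (Aarr.getD j (0,0)).2 = (P.getD j (0,0)).1)
    (hdp : ∀ j : Nat, j < i → DP.getD j 0 = (P.getD j (0,0)).2) :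
    ∀ (fuel t : Nat), t + fuel = i → ∀ cur,
      (PySem.List.pyRange (t:Int) (i:Int) 1).foldl
        (fun DP' j =>
          if (PySem.List.pyGetD Aarr (i:Int) (0,0)).2 ≥ (PySem.List.pyGetD Aarr j (0,0)).2 then
            PySem.List.pySetD DP' (i:Int)
              (max (PySem.List.pyGetD DP' (i:Int) 0)
                ((PySem.List.pyGetD Aarr (i:Int) (0,0)).1 + PySem.List.pyGetD DP' j 0))
          else DP') (DP.set i cur)
      = DP.set i ((P.drop t).foldl
          (fun c p => if p.1 ≤ (PySem.List.pyGetD Aarr (i:Int) (0,0)).2 then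
            max c ((PySem.List.pyGetD Aarr (i:Int) (0,0)).1 + p.2) else c) cur) := by
  intro fuel
  induction fuel with
  | zero =>
    intro t ht cur
    have hti : t = i := by omega
    rw [PySem.List.pyRange_one_eq_nil (by exact_mod_cast hti.ge),
        List.drop_eq_nil_of_le (by omega)]
    rfl
  | succ fuel ih =>
    intro t ht cur
    have htlt : t < i := by omega
    have htP : t < P.length := by omega
    have htD : t < DP.length := by omega
    rw [PySem.List.pyRange_one_cons (by exact_mod_cast htlt), List.foldl_cons]
    have hA : (PySem.List.pyGetD Aarr (t:Int) (0,0)).2 = (P.getD t (0,0)).1 := by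
      rw [PySem.List.pyGetD_natCast]; exact hage t htlt
    have hcur : PySem.List.pyGetD (DP.set i cur) (i:Int) 0 = cur := by
      rw [PySem.List.pyGetD_natCast,
          List.getD_eq_getElem _ _ (by simpa using hi)]
      exact List.getElem_set_self (by simpa using hi)
    have htv : PySem.List.pyGetD (DP.set i cur) (t:Int) 0 = (P.getD t (0,0)).2 := by
      rw [PySem.List.pyGetD_natCast,
          List.getD_eq_getElem _ _ (by simpa using htD),
          List.getElem_set_ne (by omega) (by simpa using htD),
          ← List.getD_eq_getElem DP 0 htD]
      exact hdp t htlt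
    have hstep :
        (if (PySem.List.pyGetD Aarr (i:Int) (0,0)).2 ≥ (PySem.List.pyGetD Aarr (t:Int) (0,0)).2 then
            PySem.List.pySetD (DP.set i cur) (i:Int)
              (max (PySem.List.pyGetD (DP.set i cur) (i:Int) 0)
                ((PySem.List.pyGetD Aarr (i:Int) (0,0)).1 + PySem.List.pyGetD (DP.set i cur) (t:Int) 0))
          else DP.set i cur)
        = DP.set i (if (P.getD t (0,0)).1 ≤ (PySem.List.pyGetD Aarr (i:Int) (0,0)).2 then
            max cur ((PySem.List.pyGetD Aarr (i:Int) (0,0)).1 + (P.getD t (0,0)).2) else cur) := by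
      rw [hA, hcur, htv]
      by_cases hc : (P.getD t (0,0)).1 ≤ (PySem.List.pyGetD Aarr (i:Int) (0,0)).2
      · rw [if_pos hc, if_pos hc, PySem.List.pySetD_natCast, List.set_set]
      · rw [if_neg hc, if_neg hc]
    rw [hstep, List.drop_eq_getElem_cons htP, List.foldl_cons,
        ← List.getD_eq_getElem P (0,0) htP]
    have hcast : ((t:Int) + 1) = (((t+1 : Nat)):Int) := by push_cast; ring
    rw [hcast]
    exact ih (t+1) (by omega) _

-- A's outer loop invariant: after the rounds i = 1 .. k-1, the DP array is the reference
-- dp values of the first k sorted pairs followed by the untouched initial scores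
lemma outerInv (L : List (Int × Int)) :
    ∀ (k : Nat), 1 ≤ k → k ≤ L.length →
      (PySem.List.pyRange 1 (k:Int) 1).foldl
        (fun DP i =>
          (PySem.List.pyRange 0 i 1).foldl
            (fun DP j =>
              if (PySem.List.pyGetD L i (0,0)).2 ≥ (PySem.List.pyGetD L j (0,0)).2 then
                PySem.List.pySetD DP i
                  (max (PySem.List.pyGetD DP i 0)
                    ((PySem.List.pyGetD L i (0,0)).1 + PySem.List.pyGetD DP j 0))
              else DP) DP) (L.map (fun p => p.1))
      = ((L.take k).foldl step2 []).map (fun p => p.2) ++ (L.map (fun p => p.1)).drop k := by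
  intro k hk1
  induction k, hk1 using Nat.le_induction with
  | base =>
    intro h1
    rw [PySem.List.pyRange_one_eq_nil (by norm_num), List.foldl_nil]
    obtain ⟨p, L', rfl⟩ : ∃ p L', L = p :: L' := by
      cases L with
      | nil => simp at h1
      | cons p L' => exact ⟨p, L', rfl⟩
    simp [step2, mfA_nil]
  | succ k hk1 ih =>
    intro hk1N
    have hkN : k < L.length := by omega
    have hkM : k < (L.map (fun p => p.1)).length := by simpa using hkN
    have hcast : (((k+1 : Nat)):Int) = (k:Int) + 1 := by push_cast; ring
    rw [hcast, PySem.List.pyRange_one_succ_right (by exact_mod_cast hk1),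
        List.foldl_append, ih (by omega), List.foldl_cons, List.foldl_nil]
    set F : List (Int × Int) := (L.take k).foldl step2 [] with hF
    set M : List Int := F.map (fun p => p.2) with hM
    set R : List Int := (L.map (fun p => p.1)).drop k with hR
    have hlenF : F.length = k := by
      rw [hF, foldl_step2_length, List.length_take_of_le (by omega)]; simp
    have hlenM : M.length = k := by rw [hM, List.length_map, hlenF]
    have hlenMR : (M ++ R).length = L.length := by
      rw [List.length_append, hlenM, hR, List.length_drop, List.length_map]
      omega
    have hfst : F.map (fun p => p.1) = (L.take k).map (fun p => p.2) := by
      simpa using foldl_step2_map_fst (L.take k) []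
    have hage : ∀ j : Nat, j < k → (L.getD j (0,0)).2 = (F.getD j (0,0)).1 := by
      intro j hj
      have hjF : j < F.length := by omega
      have hjT : j < (L.take k).length := by
        rw [List.length_take_of_le (by omega)]; omega
      rw [List.getD_eq_getElem _ _ hjF, List.getD_eq_getElem _ _ (by omega)]
      have h1 : F[j].1 = (F.map (fun p => p.1))[j]'(by simpa using hjF) := by simp
      rw [h1]
      have h2 : (F.map (fun p => p.1))[j]'(by simpa using hjF)
          = ((L.take k).map (fun p => p.2))[j]'(by simpa using hjT) := by
        congr 1
      rw [h2]
      simp [List.getElem_take]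
    have hdp : ∀ j : Nat, j < k → (M ++ R).getD j 0 = (F.getD j (0,0)).2 := by
      intro j hj
      have hjF : j < F.length := by omega
      rw [List.getD_append _ _ _ _ (by omega), hM,
          List.getD_eq_getElem _ _ (by simpa [hlenF] using hj),
          List.getD_eq_getElem _ _ hjF]
      simp
    have hLk : PySem.List.pyGetD L ((k:Nat):Int) (0,0) = L[k] := by
      rw [PySem.List.pyGetD_natCast]
      exact List.getD_eq_getElem _ _ hkN
    have hinner := innerAux L F (M ++ R) k (by omega) hlenF hage hdp k 0 (by omega)
      ((M ++ R).getD k 0)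
    rw [Nat.cast_zero] at hinner
    have hstart : (M ++ R) = (M ++ R).set k ((M ++ R).getD k 0) := by
      rw [List.getD_eq_getElem _ _ (by omega), List.set_getElem_self]
    calc (PySem.List.pyRange 0 ((k:Nat):Int) 1).foldl
            (fun DP j =>
              if (PySem.List.pyGetD L ((k:Nat):Int) (0,0)).2 ≥ (PySem.List.pyGetD L j (0,0)).2 then
                PySem.List.pySetD DP ((k:Nat):Int)
                  (max (PySem.List.pyGetD DP ((k:Nat):Int) 0)
                    ((PySem.List.pyGetD L ((k:Nat):Int) (0,0)).1 + PySem.List.pyGetD DP j 0))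
              else DP) (M ++ R)
        = (M ++ R).set k ((F.drop 0).foldl
            (fun c p => if p.1 ≤ (PySem.List.pyGetD L ((k:Nat):Int) (0,0)).2 then
              max c ((PySem.List.pyGetD L ((k:Nat):Int) (0,0)).1 + p.2) else c)
            ((M ++ R).getD k 0)) := by
          conv_lhs => rw [hstart]
          exact hinner
      _ = ((L.take (k+1)).foldl step2 []).map (fun p => p.2)
            ++ (L.map (fun p => p.1)).drop (k+1) := by
        have hgetk : (M ++ R).getD k 0 = L[k].1 := by
          rw [List.getD_append_right _ _ _ _ (by omega), hlenM, Nat.sub_self, hR,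
              List.getD_eq_getElem _ _ (by rw [List.length_drop]; simpa using hkN),
              List.getElem_drop]
          simp
        rw [List.drop_zero, hgetk, hLk]
        have hshift : F.foldl (fun c p => if p.1 ≤ L[k].2 then max c (L[k].1 + p.2) else c)
            L[k].1 = L[k].1 + mfA L[k].2 0 F := by
          have := foldl_shift L[k].2 L[k].1 F 0
          simpa using this
        rw [hshift]
        rw [List.set_append_right _ _ (by omega), hlenM, Nat.sub_self, hR,
            List.drop_eq_getElem_cons hkM, List.set_cons_zero]
        rw [List.take_succ_eq_append_getElem hkN, List.foldl_append, ← hF,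
            List.foldl_cons, List.foldl_nil]
        have hstep2 : step2 F L[k] = F ++ [(L[k].2, L[k].1 + mfA L[k].2 0 F)] := rfl
        rw [hstep2]
        simp
        exact hM

-- A's building loop is zip when ages is long enough
lemma build_eq_zip (scores ages : List Int) (hle : scores.length ≤ ages.length) :
    (PySem.List.pyRange 0 (scores.length:Int) 1).foldl
      (fun acc i => acc ++ [(PySem.List.pyGetD scores i 0, PySem.List.pyGetD ages i 0)]) []
    = scores.zip ages := by
  rw [PySem.List.foldl_append_singleton_eq_map, List.nil_append,
      PySem.List.pyRange_zero_nat, List.map_map]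
  apply List.ext_getElem
  · simp [List.length_zip]; omega
  · intro k h1 h2
    have hk : k < scores.length := by simpa using h1
    simp only [List.getElem_map, List.getElem_range, Function.comp_apply,
      PySem.List.pyGetD_natCast, List.getElem_zip]
    rw [List.getD_eq_getElem _ _ hk, List.getD_eq_getElem _ _ (by omega)]

-- A's DP initialisation is the scores of the sorted pairs
lemma DP0_eq (L : List (Int × Int)) :
    (PySem.List.pyRange 0 (L.length:Int) 1).map (fun i => (PySem.List.pyGetD L i (0,0)).1)
    = L.map (fun p => p.1) := by
  have h : (fun (i : Int) => (PySem.List.pyGetD L i (0,0)).1)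
      = (fun p => p.1) ∘ (fun (j : Int) => PySem.List.pyGetD L j (0,0)) := rfl
  rw [h, ← List.map_map, PySem.List.map_pyGetD_pyRange_zero']

-- max(list) equals Source B's running best over the same values
lemma final_eq (l : List Int) (hl : l ≠ []) :
    (PySem.List.max? l (fun x => x)).getD 0 = (l.foldl updOpt none).getD 0 := by
  cases l with
  | nil => exact absurd rfl hl
  | cons x t =>
    rw [PySem.List.max?_id_cons, List.foldl_cons]
    have h0 : updOpt none x = some x := rfl
    rw [h0, foldl_updOpt_some]

theorem team_spec : Claim_equal_team := by
  intro scores ages _ hpre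
  obtain ⟨hne, hle⟩ := hpre
  unfold Spec_team
  have hzip := build_eq_zip scores ages hle
  set L := PySem.List.sorted2 (scores.zip ages) (fun p => p.1) (fun p => p.2) with hLdef
  have hLlen : L.length = scores.length := by
    rw [hLdef, (PySem.List.sorted2_perm (scores.zip ages) (fun p => p.1) (fun p => p.2) false).length_eq,
        List.length_zip]
    omega
  have hLne : L ≠ [] := by
    intro h
    exact hne (List.eq_nil_iff_length_eq_zero.mpr (by rw [← hLlen, h]; rfl))
  have hN1 : 1 ≤ L.length := by
    cases hL : L with
    | nil => exact (hLne hL).elim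
    | cons p t => simp
  have hdne : dvals [] L ≠ [] := by
    cases hL : L with
    | nil => exact (hLne hL).elim
    | cons p t => simp [dvals]
  have hA : team scores ages = (PySem.List.max? (dvals [] L) (fun x => x)).getD 0 := by
    unfold team
    simp only [hzip]
    rw [← hLdef]
    rw [show ((scores.length : Nat) : Int) = ((L.length : Nat) : Int) by rw [hLlen]]
    have hds : (L.foldl step2 []).map (fun p => p.2) = dvals [] L := by
      simpa using foldl_step2_map_snd L []
    have hdrop : (L.map (fun p => p.1)).drop L.length = [] := by simp
    rw [DP0_eq L, outerInv L L.length hN1 (le_refl _),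
        List.take_length, hdrop, List.append_nil, hds]
  have hB : team_alt scores ages = ((dvals [] L).foldl updOpt none).getD 0 :=
    congrArg (fun o : Option Int => o.getD 0) (Bmain L [] [] none (fun _ _ => rfl))
  rw [hA, hB]
  exact final_eq _ hdne
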